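-- pv_equiv track=rewrite | github.com/limachara/EGE_2024 | task5CC2816/5CC2816-11.py | f
-- ===== SOURCE A (Python) =====
-- def f(n):
--     s = f'{n:b}'
--     c1 = 0
--     c0 = 0
--     for i in range(len(s)):
--         if i % 2 != 0:
--             if s[i] == '1':
--                 c1 += 1
--         else:
--             if s[i] == '0':
--                 c0 += 1
--
--     return abs(c1 - c0)
-- ===== SOURCE B (Python) =====
-- def f(n):
--     s = f'{n:b}'
--     return abs(s[1::2].count('1') - s[::2].count('0'))
-- ===== Notes on version B (the rewrite author's own statement) =====
-- stated objective: simpler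
-- what changed: Replaces A's single indexed loop with per-index parity branching by two stride slices of the binary string: count '1' in the odd-index subsequence and '0' in the even-index subsequence, then take the absolute difference.
import Mathlib
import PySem

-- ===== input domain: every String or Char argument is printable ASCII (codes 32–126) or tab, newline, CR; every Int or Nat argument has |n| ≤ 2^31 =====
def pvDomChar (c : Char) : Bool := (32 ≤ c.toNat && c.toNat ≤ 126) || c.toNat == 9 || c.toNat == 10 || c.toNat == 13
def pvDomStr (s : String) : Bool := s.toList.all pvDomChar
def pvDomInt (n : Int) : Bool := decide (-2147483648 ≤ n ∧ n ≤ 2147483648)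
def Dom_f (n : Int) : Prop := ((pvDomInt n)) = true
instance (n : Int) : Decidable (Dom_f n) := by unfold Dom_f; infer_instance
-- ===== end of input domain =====

-- B replaces A's single indexed loop (parity branch per index) by two stride slices
-- of the binary string and two counts; objective: simpler.

-- ===== PORT A =====
def f (n : Int) : Int :=
  let s := PySem.Int.toBinChars n
  let r := (PySem.List.pyRange 0 (PySem.List.len s) 1).foldl
    (fun (acc : Int × Int) i =>
      if PySem.Int.mod i 2 ≠ 0 then
        (if PySem.List.pyGetD s i ' ' = '1' then (acc.1 + 1, acc.2) else acc)
      else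
        (if PySem.List.pyGetD s i ' ' = '0' then (acc.1, acc.2 + 1) else acc))
    ((0 : Int), (0 : Int))
  |r.1 - r.2|

-- ===== PORT B =====
-- s[1::2] / s[::2] are PySem.List.slice?; step 2 ≠ 0 so the Option is always some (getD totalises).
def f_alt (n : Int) : Int :=
  let s := PySem.Int.toBinChars n
  let c1 : Int := PySem.List.count ((PySem.List.slice? s (some 1) none 2).getD []) '1'
  let c0 : Int := PySem.List.count ((PySem.List.slice? s none none 2).getD []) '0'
  |c1 - c0|

-- ===== PRECONDITION & SPEC =====
def Spec_f (n : Int) (out : Int) : Prop := out = f_alt n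
instance (n : Int) (out : Int) : Decidable (Spec_f n out) := by unfold Spec_f; infer_instance

-- ===== CLAIM (what is proved, stated in full; the proofs are below) =====
def Claim_equal_f : Prop := ∀ (n : Int), Dom_f n → Spec_f n (f n)

-- ===== LEMMAS AND PROOFS =====

/-- The even-index subsequence xs[::2] (proof helper). -/
def pvEvens {α : Type} : List α → List α
  | [] => []
  | [x] => [x]
  | x :: _ :: t => x :: pvEvens t

theorem pvEvens_cons {α : Type} (c : α) (t : List α) :
    pvEvens (c :: t) = c :: pvEvens t.tail := by
  cases t <;> rfl

theorem pv_fmE {α : Type} (xs : List α) :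
    List.filterMap (fun k => xs[2*k]?) (List.range ((xs.length + 1) / 2)) = pvEvens xs := by
  induction xs using pvEvens.induct with
  | case1 => simp [pvEvens]
  | case2 x => simp [pvEvens, List.range_succ]
  | case3 x y t ih =>
    have hlen : ((x :: y :: t).length + 1) / 2 = ((t.length + 1) / 2) + 1 := by
      simp [List.length_cons]; omega
    rw [hlen, List.range_succ_eq_map, List.filterMap_cons, List.filterMap_map]
    simp only [pvEvens]
    have : (fun k => (x :: y :: t)[2*k]?) ∘ Nat.succ = fun k => t[2*k]? := by
      funext k
      show (x :: y :: t)[2 * Nat.succ k]? = t[2*k]?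
      have h2 : 2 * Nat.succ k = (2 * k + 1) + 1 := by omega
      rw [h2]
      simp
    rw [this, ih]
    simp

theorem pv_fmO {α : Type} (xs : List α) :
    List.filterMap (fun k => xs[2*k+1]?) (List.range (xs.length / 2)) = pvEvens xs.tail := by
  cases xs with
  | nil => simp [pvEvens]
  | cons c t =>
    have hlen : (c :: t).length / 2 = (t.length + 1) / 2 := by
      simp [List.length_cons]
    rw [hlen]
    have : (fun k => (c :: t)[2*k+1]?) = fun k => t[2*k]? := by
      funext k
      show (c :: t)[(2*k) + 1]? = t[2*k]?
      simp
    rw [this, pv_fmE]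
    rfl

theorem pv_sliceIdxE (n : Nat) :
    PySem.List.sliceIndices n none none 2 = (0, (n:Int), 2) := by
  unfold PySem.List.sliceIndices
  norm_num

theorem pv_sliceIdxO (n : Nat) :
    PySem.List.sliceIndices n (some 1) none 2 = (min 1 (n:Int), (n:Int), 2) := by
  unfold PySem.List.sliceIndices
  norm_num

theorem pv_sliceE {α : Type} (xs : List α) :
    PySem.List.slice? xs none none 2 = some (pvEvens xs) := by
  rw [← pv_fmE]
  have h20 : ¬ ((2:Int) = 0) := by norm_num
  unfold PySem.List.slice?
  rw [if_neg h20, pv_sliceIdxE]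
  show some (List.filterMap (fun k : Nat => xs[((0:Int) + 2 * (k:Int)).toNat]?)
      (List.range (if (0:Int) < 2 then (if (0:Int) < (xs.length:Int) then (((xs.length:Int) - 0 + 2 - 1) / 2).toNat else 0)
        else (if (xs.length:Int) < 0 then (((0:Int) - (xs.length:Int) + -2 - 1) / -2).toNat else 0)))) = _
  have h1 : (fun k : Nat => xs[((0:Int) + 2*(k:Int)).toNat]?) = fun k => xs[2*k]? := by
    funext k
    congr 1
    omega
  have h2 : (if (0:Int) < 2 then (if (0:Int) < (xs.length:Int) then (((xs.length:Int) - 0 + 2 - 1) / 2).toNat else 0)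
        else (if (xs.length:Int) < 0 then (((0:Int) - (xs.length:Int) + -2 - 1) / -2).toNat else 0)) = (xs.length+1)/2 := by
    rw [if_pos (by norm_num)]
    rcases Nat.eq_zero_or_pos xs.length with h|h
    · simp [h]
    · rw [if_pos (by exact_mod_cast h)]
      omega
  rw [h1, h2]

theorem pv_sliceO {α : Type} (xs : List α) :
    PySem.List.slice? xs (some 1) none 2 = some (pvEvens xs.tail) := by
  rw [← pv_fmO]
  cases xs with
  | nil =>
    have h20 : ¬ ((2:Int) = 0) := by norm_num
    unfold PySem.List.slice? PySem.List.sliceIndices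
    norm_num
  | cons c t =>
    have h20 : ¬ ((2:Int) = 0) := by norm_num
    have hmin : min (1:Int) (((c :: t).length : Nat) : Int) = 1 := by
      rw [min_eq_left]
      simp
    unfold PySem.List.slice?
    rw [if_neg h20, pv_sliceIdxO, hmin]
    show some (List.filterMap (fun k : Nat => (c :: t)[((1:Int) + 2 * (k:Int)).toNat]?)
        (List.range (if (0:Int) < 2 then (if (1:Int) < ((c :: t).length:Int) then ((((c :: t).length:Int) - 1 + 2 - 1) / 2).toNat else 0)
          else (if ((c :: t).length:Int) < 1 then (((1:Int) - ((c :: t).length:Int) + -2 - 1) / -2).toNat else 0)))) = _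
    have h1 : (fun k : Nat => (c :: t)[((1:Int) + 2*(k:Int)).toNat]?) = fun k => (c :: t)[2*k+1]? := by
      funext k
      congr 1
      omega
    have h2 : (if (0:Int) < 2 then (if (1:Int) < ((c :: t).length:Int) then ((((c :: t).length:Int) - 1 + 2 - 1) / 2).toNat else 0)
          else (if ((c :: t).length:Int) < 1 then (((1:Int) - ((c :: t).length:Int) + -2 - 1) / -2).toNat else 0)) = (c :: t).length/2 := by
      rw [if_pos (by norm_num)]
      by_cases h : (1:Int) < ((c :: t).length:Int)
      · rw [if_pos h]
        omega
      · rw [if_neg h]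
        simp only [List.length_cons] at h ⊢
        push_cast at h
        omega
    rw [h1, h2]

/-- A's loop, restated structurally on the remaining characters with the current index. -/
def pvGo : List Char → Nat → Int × Int → Int × Int
  | [], _, acc => acc
  | c :: t, i, acc =>
      pvGo t (i + 1)
        (if i % 2 ≠ 0 then (if c = '1' then (acc.1 + 1, acc.2) else acc)
         else (if c = '0' then (acc.1, acc.2 + 1) else acc))

theorem pvGo_spec (cs : List Char) : ∀ (i : Nat) (acc : Int × Int),
    pvGo cs i acc =
      if i % 2 = 0 then
        (acc.1 + (List.count '1' (pvEvens cs.tail) : Int), acc.2 + (List.count '0' (pvEvens cs) : Int))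
      else
        (acc.1 + (List.count '1' (pvEvens cs) : Int), acc.2 + (List.count '0' (pvEvens cs.tail) : Int)) := by
  induction cs with
  | nil => intro i acc; simp [pvGo, pvEvens]
  | cons c t ih =>
    intro i acc
    rw [pvGo, ih, pvEvens_cons]
    by_cases hp : i % 2 = 0
    · have hp1 : ¬ ((i + 1) % 2 = 0) := by omega
      by_cases hc : c = '0'
      · subst hc
        simp [hp, hp1, Prod.ext_iff]
        ring
      · simp [hp, hp1, hc]
    · have hp1 : (i + 1) % 2 = 0 := by omega
      by_cases hc : c = '1'
      · subst hc
        simp [hp, hp1, Prod.ext_iff]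
        ring
      · simp [hp, hp1, hc]

theorem pv_bridge (s : List Char) : ∀ (post pre : List Char) (acc : Int × Int), s = pre ++ post →
    (PySem.List.pyRange (pre.length : Int) (s.length : Int) 1).foldl
      (fun (acc : Int × Int) i =>
        if PySem.Int.mod i 2 ≠ 0 then
          (if PySem.List.pyGetD s i ' ' = '1' then (acc.1 + 1, acc.2) else acc)
        else
          (if PySem.List.pyGetD s i ' ' = '0' then (acc.1, acc.2 + 1) else acc)) acc
      = pvGo post pre.length acc := by
  intro post
  induction post with
  | nil =>
    intro pre acc h
    subst h
    rw [PySem.List.pyRange_one_eq_nil (by simp)]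
    rfl
  | cons c t ih =>
    intro pre acc h
    subst h
    have hlt : (pre.length : Int) < ((pre ++ c :: t).length : Int) := by
      simp
    rw [PySem.List.pyRange_one_cons hlt, List.foldl_cons]
    have hget : PySem.List.pyGetD (pre ++ c :: t) (pre.length : Int) ' ' = c := by
      rw [PySem.List.pyGetD_natCast]
      simp [List.getD_eq_getElem?_getD]
    have hmod : PySem.Int.mod (pre.length : Int) 2 = ((pre.length % 2 : Nat) : Int) := by
      rw [PySem.Int.mod_eq_emod_of_pos (by norm_num)]
      push_cast
      rfl
    have hlen1 : ((pre ++ [c]).length : Int) = (pre.length : Int) + 1 := by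
      simp
    have := ih (pre ++ [c]) (if PySem.Int.mod (pre.length : Int) 2 ≠ 0 then
          (if PySem.List.pyGetD (pre ++ c :: t) (pre.length : Int) ' ' = '1' then (acc.1 + 1, acc.2) else acc)
        else
          (if PySem.List.pyGetD (pre ++ c :: t) (pre.length : Int) ' ' = '0' then (acc.1, acc.2 + 1) else acc))
        (by simp)
    rw [hlen1] at this
    rw [this]
    rw [pvGo]
    simp only [hget, hmod, List.length_append, List.length_cons, List.length_nil]
    by_cases hp : pre.length % 2 = 0
    · simp [hp]
    · simp [hp]
      rw [if_pos (show ((pre.length : Nat) : Int) % 2 = 1 by omega)]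

-- ===== VERDICT (by name: the statement is the Claim_ definition above) =====
theorem f_spec : Claim_equal_f := by
  intro n _
  unfold Spec_f f f_alt
  simp only []
  have hb := pv_bridge (PySem.Int.toBinChars n) (PySem.Int.toBinChars n) [] ((0 : Int), (0 : Int)) (by simp)
  simp only [List.length_nil, Nat.cast_zero] at hb
  simp only [PySem.List.len]
  rw [hb, pvGo_spec]
  simp [pv_sliceE, pv_sliceO, PySem.List.count]
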